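-- pv_equiv track=rewrite | github.com/hjmkt/pixi-template | flask/solver.py | get_disjoint_unions
-- ===== SOURCE A (Python) =====
-- def get_disjoint_unions(problem, vs):
--     par = [i for i in range(len(problem['figure']['vertices']))]
--     def find(x):
--         if par[x]==x:
--             return x
--         par[x] = find(par[x])
--         return par[x]
--     def unite(x, y):
--         x = find(x)
--         y = find(y)
--         if x==y:
--             return 0
--         par[x] = y
--     for e in problem['figure']['edges']:
--         if e[0] in vs or e[1] in vs:
--             continue
--         unite(e[0], e[1])
--     unions = {}
--     for i in range(len(par)):
--         p = find(i)
--         if p in vs: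
--             continue
--         if p in unions.keys():
--             unions[p].append(i)
--         else:
--             unions[p] = [i]
--     return list(unions.values())
-- ===== SOURCE B (Python) =====
-- def get_disjoint_unions(problem, vs):
--     verts = problem['figure']['vertices']
--     edges = problem['figure']['edges']
--     comps = [[i] for i in range(len(verts)) if i not in vs]
--     for e in edges:
--         if e[0] in vs or e[1] in vs:
--             continue
--         a = next(k for k, c in enumerate(comps) if e[0] in c)
--         b = next(k for k, c in enumerate(comps) if e[1] in c)
--         if a != b:
--             lo, hi = min(a, b), max(a, b)
--             comps[lo] = sorted(comps[lo] + comps[hi])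
--             comps.pop(hi)
--     return comps
-- ===== Notes on version B (the rewrite author's own statement) =====
-- stated objective: alternative
-- what changed: Replaces the union-find parent forest (recursive find with path compression, unite, then a dict grouping vertices by root) with direct maintenance of the list of components: start from non-vs singletons and, per edge, merge the two blocks containing its endpoints into the earlier block as a sorted list, so no parent array, find, or grouping pass exists.
import Mathlib
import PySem

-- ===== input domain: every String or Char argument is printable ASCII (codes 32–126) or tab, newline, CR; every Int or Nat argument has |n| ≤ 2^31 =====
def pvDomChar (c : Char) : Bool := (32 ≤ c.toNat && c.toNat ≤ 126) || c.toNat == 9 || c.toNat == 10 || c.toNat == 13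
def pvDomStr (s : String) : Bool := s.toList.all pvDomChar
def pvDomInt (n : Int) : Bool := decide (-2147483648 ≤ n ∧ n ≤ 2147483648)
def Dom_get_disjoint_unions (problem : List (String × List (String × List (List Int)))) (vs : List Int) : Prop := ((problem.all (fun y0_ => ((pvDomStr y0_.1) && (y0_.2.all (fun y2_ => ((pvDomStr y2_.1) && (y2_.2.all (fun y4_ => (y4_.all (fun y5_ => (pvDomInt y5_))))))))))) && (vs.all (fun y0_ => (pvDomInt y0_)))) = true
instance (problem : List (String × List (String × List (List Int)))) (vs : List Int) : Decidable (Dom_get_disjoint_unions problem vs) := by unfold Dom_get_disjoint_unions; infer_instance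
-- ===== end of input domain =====

-- ===== PORT A =====
-- B replaces A's union-find with direct merging of component lists; equal output proved on Pre_.
-- find(x) with path compression; the fuel argument only makes the recursion structural (called with
-- fuel = len(par), enough under the parent-forest invariant; Python's recursion has no fuel).
def findA : Nat → List Int → Nat → List Int × Nat
  | 0, par, x => (par, x)
  | fuel+1, par, x =>
    if par.getD x 0 = (x : Int) then (par, x)
    else
      let r := findA fuel par (par.getD x 0).toNat
      (r.1.set x (r.2 : Int), r.2)

def uniteA (fuel : Nat) (par : List Int) (a b : Nat) : List Int :=
  let fx := findA fuel par a
  let fy := findA fuel fx.1 b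
  if fx.2 = fy.2 then fy.1 else fy.1.set fx.2 (fy.2 : Int)

def edgeStepA (vs : List Int) (par : List Int) (e : List Int) : List Int :=
  let e0 := PySem.List.pyGetD e 0 0
  if vs.contains e0 then par
  else
    let e1 := PySem.List.pyGetD e 1 0
    if vs.contains e1 then par
    else uniteA par.length par e0.toNat e1.toNat

def groupStepA (vs : List Int) (st : List Int × PySem.Dict Int (List Int)) (i : Int) :
    List Int × PySem.Dict Int (List Int) :=
  let f := findA st.1.length st.1 i.toNat
  let p : Int := (f.2 : Int)
  if vs.contains p then (f.1, st.2)
  else if st.2.contains p then (f.1, st.2.modify p [] (· ++ [i]))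
  else (f.1, st.2.insert p [i])

def get_disjoint_unions (problem : List (String × List (String × List (List Int)))) (vs : List Int) : List (List Int) :=
  match problem.lookup "figure" with
  | none => []
  | some fig =>
    match fig.lookup "vertices" with
    | none => []
    | some verts =>
      match fig.lookup "edges" with
      | none => []
      | some edges =>
        let par0 : List Int := PySem.List.pyRange 0 (verts.length : Int) 1
        let par1 := edges.foldl (edgeStepA vs) par0
        let st := (PySem.List.pyRange 0 (par1.length : Int) 1).foldl (groupStepA vs)
                    (par1, (PySem.Dict.empty : PySem.Dict Int (List Int)))
        st.2.values

-- ===== PORT B =====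
def mergeStepB (vs : List Int) (comps : List (List Int)) (e : List Int) : List (List Int) :=
  let e0 := PySem.List.pyGetD e 0 0
  if vs.contains e0 then comps
  else
    let e1 := PySem.List.pyGetD e 1 0
    if vs.contains e1 then comps
    else
      match comps.findIdx? (fun c => c.contains e0), comps.findIdx? (fun c => c.contains e1) with
      | some a, some b =>
        if a = b then comps
        else
          let lo := min a b
          let hi := max a b
          let merged := PySem.List.sorted (comps.getD lo [] ++ comps.getD hi []) (fun x => x) false
          (comps.set lo merged).eraseIdx hi
      | _, _ => comps

def get_disjoint_unions_alt (problem : List (String × List (String × List (List Int)))) (vs : List Int) : List (List Int) :=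
  match problem.lookup "figure" with
  | none => []
  | some fig =>
    match fig.lookup "vertices" with
    | none => []
    | some verts =>
      match fig.lookup "edges" with
      | none => []
      | some edges =>
        let comps0 : List (List Int) :=
          ((PySem.List.pyRange 0 (verts.length : Int) 1).filter (fun i => !vs.contains i)).map (fun i => [i])
        edges.foldl (mergeStepB vs) comps0

-- ===== PRECONDITION & SPEC =====
def pvEdgeOK (vs : List Int) (n : Int) (e : List Int) : Bool :=
  !e.isEmpty &&
    (vs.contains (e.getD 0 0) ||
      (decide (2 ≤ e.length) &&
        (vs.contains (e.getD 1 0) ||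
          (decide (0 ≤ e.getD 0 0) && decide (e.getD 0 0 < n) &&
           decide (0 ≤ e.getD 1 0) && decide (e.getD 1 0 < n)))))

def pvPreB (problem : List (String × List (String × List (List Int)))) (vs : List Int) : Bool :=
  match problem.lookup "figure" with
  | none => false
  | some fig =>
    match fig.lookup "vertices", fig.lookup "edges" with
    | some verts, some edges =>
      decide (problem.map (fun p => p.1)).Nodup && decide (fig.map (fun p => p.1)).Nodup &&
        edges.all (pvEdgeOK vs (verts.length : Int))
    | _, _ => false

-- Pre_ excludes inputs on which A raises (missing 'figure'/'vertices'/'edges' keys, an edge list too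
-- short for the accessed positions, endpoints out of range); edges with in-range NEGATIVE endpoints,
-- where A silently relies on Python's negative-index wraparound while B raises StopIteration; and
-- association lists with duplicate keys, where a Python dict (last occurrence wins) and the assoc-list
-- reading (first match) denote different inputs.
def Pre_get_disjoint_unions (problem : List (String × List (String × List (List Int)))) (vs : List Int) : Prop :=
  pvPreB problem vs = true
instance (problem : List (String × List (String × List (List Int)))) (vs : List Int) : Decidable (Pre_get_disjoint_unions problem vs) := by
  unfold Pre_get_disjoint_unions; infer_instance

def pvWitness_get_disjoint_unions : (List (String × List (String × List (List Int)))) × List Int :=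
  ([("figure", [("vertices", [[0, 0], [1, 0], [2, 0], [3, 0]]), ("edges", [[0, 1], [1, 3], [2, 4]])])], [2])

def Spec_get_disjoint_unions (problem : List (String × List (String × List (List Int)))) (vs : List Int) (out : List (List Int)) : Prop := out = get_disjoint_unions_alt problem vs
instance (problem : List (String × List (String × List (List Int)))) (vs : List Int) (out : List (List Int)) : Decidable (Spec_get_disjoint_unions problem vs out) := by unfold Spec_get_disjoint_unions; infer_instance

-- ===== CLAIM (what is proved, stated in full; the proofs are below) =====
def Claim_equal_get_disjoint_unions : Prop := ∀ (problem : List (String × List (String × List (List Int)))) (vs : List Int), Dom_get_disjoint_unions problem vs → Pre_get_disjoint_unions problem vs → Spec_get_disjoint_unions problem vs (get_disjoint_unions problem vs)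

-- ===== LEMMAS AND PROOFS =====

/- ---------- parent-forest (union-find) theory for port A ---------- -/

def pvStep (par : List Int) (x : Nat) : Nat := (par.getD x 0).toNat

def pvRoot (par : List Int) (x : Nat) : Nat := (pvStep par)^[par.length] x

def pvInv (n : Nat) (par : List Int) : Prop :=
  par.length = n ∧
  (∀ x, x < n → par.getD x 0 = (pvStep par x : Int) ∧ pvStep par x < n) ∧
  (∀ x, x < n → ∀ k, 0 < k → (pvStep par)^[k] x = x → pvStep par x = x)

lemma pvIter_lt {n : Nat} {par : List Int} (h : pvInv n par) {x : Nat} (hx : x < n) :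
    ∀ k, (pvStep par)^[k] x < n := by
  intro k
  induction k generalizing x with
  | zero => simpa using hx
  | succ k ih =>
    rw [Function.iterate_succ_apply]
    exact ih ((h.2.1 x hx).2)

lemma pvExists_fix {n : Nat} {par : List Int} (h : pvInv n par) {x : Nat} (hx : x < n) :
    ∃ k < n, pvStep par ((pvStep par)^[k] x) = (pvStep par)^[k] x := by
  have hg : ∃ a b : Fin (n+1), a ≠ b ∧
      (fun j : Fin (n+1) => (⟨(pvStep par)^[j.1] x, pvIter_lt h hx j.1⟩ : Fin n)) a =
      (fun j : Fin (n+1) => (⟨(pvStep par)^[j.1] x, pvIter_lt h hx j.1⟩ : Fin n)) b := by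
    apply Fintype.exists_ne_map_eq_of_card_lt
    simp
  obtain ⟨a, b, hab, heq⟩ := hg
  simp only [Fin.mk.injEq] at heq
  -- wlog a.1 < b.1
  rcases Nat.lt_or_ge a.1 b.1 with hlt | hge
  · refine ⟨a.1, ?_, ?_⟩
    · omega
    · -- cycle of length b.1 - a.1 at y := iter a x
      have hy : (pvStep par)^[b.1 - a.1] ((pvStep par)^[a.1] x) = (pvStep par)^[a.1] x := by
        rw [← Function.iterate_add_apply]
        have : b.1 - a.1 + a.1 = b.1 := by omega
        rw [this, heq]
      exact h.2.2 _ (pvIter_lt h hx a.1) _ (by omega) hy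
  · have hlt : b.1 < a.1 := by
      rcases Nat.lt_or_ge b.1 a.1 with h' | h'
      · exact h'
      · exfalso; exact hab (Fin.ext (by omega))
    refine ⟨b.1, ?_, ?_⟩
    · omega
    · have hy : (pvStep par)^[a.1 - b.1] ((pvStep par)^[b.1] x) = (pvStep par)^[b.1] x := by
        rw [← Function.iterate_add_apply]
        have : a.1 - b.1 + b.1 = a.1 := by omega
        rw [this, ← heq]
      exact h.2.2 _ (pvIter_lt h hx b.1) _ (by omega) hy

lemma pvRoot_eq_of_fix {n : Nat} {par : List Int} (h : pvInv n par) {x : Nat} (hx : x < n)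
    {k : Nat} (hk : k ≤ n) (hfix : pvStep par ((pvStep par)^[k] x) = (pvStep par)^[k] x) :
    pvRoot par x = (pvStep par)^[k] x := by
  have hL : par.length = n := h.1
  have : (pvStep par)^[n] x = (pvStep par)^[(n - k) + k] x := by
    congr 1; omega
  rw [pvRoot, hL, this, Function.iterate_add_apply, Function.iterate_fixed hfix]

lemma pvRoot_isFix {n : Nat} {par : List Int} (h : pvInv n par) {x : Nat} (hx : x < n) :
    pvStep par (pvRoot par x) = pvRoot par x := by
  obtain ⟨k, hk, hfix⟩ := pvExists_fix h hx
  rw [pvRoot_eq_of_fix h hx (Nat.le_of_lt hk) hfix]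
  exact hfix

lemma pvRoot_lt {n : Nat} {par : List Int} (h : pvInv n par) {x : Nat} (hx : x < n) :
    pvRoot par x < n := by
  have := pvIter_lt h hx par.length
  simpa [pvRoot] using this

lemma pvRoot_step {n : Nat} {par : List Int} (h : pvInv n par) {x : Nat} (hx : x < n) :
    pvRoot par (pvStep par x) = pvRoot par x := by
  have : pvRoot par (pvStep par x) = pvStep par (pvRoot par x) := by
    rw [pvRoot, pvRoot, ← Function.iterate_succ_apply, Function.iterate_succ_apply']
  rw [this, pvRoot_isFix h hx]

lemma pvRoot_fix_self {par : List Int} {r : Nat} (hr : pvStep par r = r) :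
    pvRoot par r = r := by
  simp [pvRoot, Function.iterate_fixed hr]

lemma pvFix_of_root_self {n : Nat} {par : List Int} (h : pvInv n par) {z : Nat} (hz : z < n)
    (hroot : pvRoot par z = z) : pvStep par z = z := by
  have hL : par.length = n := h.1
  exact h.2.2 z hz n (by omega) (by rw [← hL]; exact hroot)

lemma pvStep_set {par : List Int} {a t : Nat} (ha : a < par.length) (y : Nat) :
    pvStep (par.set a ((t : Nat) : Int)) y = if y = a then t else pvStep par y := by
  by_cases hya : y = a
  · subst hya
    simp [pvStep, List.getD, ha]
  · simp [pvStep, List.getD, Ne.symm hya, hya]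

lemma pvInv_set {n : Nat} {par : List Int} (h : pvInv n par) {a t : Nat} (ha : a < n)
    (ht : t < n) (htr : pvStep par t = t) : pvInv n (par.set a ((t : Nat) : Int)) := by
  have hL : par.length = n := h.1
  have ha' : a < par.length := by omega
  have hstep : ∀ y, pvStep (par.set a ((t : Nat) : Int)) y = if y = a then t else pvStep par y :=
    pvStep_set ha'
  have hfix' : pvStep (par.set a ((t : Nat) : Int)) t = t := by
    rw [hstep]; split <;> simp [htr]
  refine ⟨by simp [hL], ?_, ?_⟩
  · intro x hx
    rw [hstep]
    by_cases hxa : x = a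
    · subst hxa
      constructor
      · simp [List.getD, ha']
      · simp [ht]
    · constructor
      · rw [if_neg hxa]
        have : (par.set a ((t : Nat) : Int)).getD x 0 = par.getD x 0 := by
          simp [List.getD, Ne.symm hxa]
        rw [this]; exact (h.2.1 x hx).1
      · rw [if_neg hxa]; exact (h.2.1 x hx).2
  · intro x hx k hk hcyc
    by_cases hhit : ∃ j, j < k ∧ (pvStep (par.set a ((t : Nat) : Int)))^[j] x = a
    · obtain ⟨j, hj, hja⟩ := hhit
      set f' := pvStep (par.set a ((t : Nat) : Int)) with hf'
      have hta : ∀ m, 1 ≤ m → f'^[m] a = t := by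
        intro m hm
        have hm' : m = (m - 1) + 1 := by omega
        rw [hm', Function.iterate_succ_apply]
        have hfa : f' a = t := by rw [hstep]; simp
        rw [hfa, Function.iterate_fixed hfix']
      have hxt : x = t := by
        have h1 : f'^[k - j] a = x := by
          rw [← hja, ← Function.iterate_add_apply]
          have : k - j + j = k := by omega
          rw [this]; exact hcyc
        rw [← h1, hta (k - j) (by omega)]
      rw [hxt, hfix']
    · push_neg at hhit
      have hsame : ∀ j, j ≤ k → (pvStep (par.set a ((t : Nat) : Int)))^[j] x = (pvStep par)^[j] x := by
        intro j
        induction j with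
        | zero => intro _; simp
        | succ j ih =>
          intro hj
          rw [Function.iterate_succ_apply', Function.iterate_succ_apply', hstep,
            if_neg (hhit j (by omega)), ih (by omega)]
      have hcy : (pvStep par)^[k] x = x := by rw [← hsame k le_rfl]; exact hcyc
      have hfx : pvStep par x = x := h.2.2 x hx k hk hcy
      have hxa : x ≠ a := by
        have := hhit 0 hk
        simpa using this
      rw [hstep, if_neg hxa, hfx]

lemma pvRoot_set_compress {n : Nat} {par : List Int} (h : pvInv n par) {a : Nat} (ha : a < n)
    {y : Nat} (hy : y < n) :
    pvRoot (par.set a ((pvRoot par a : Nat) : Int)) y = pvRoot par y := by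
  have hts : pvStep par (pvRoot par a) = pvRoot par a := pvRoot_isFix h ha
  have ht : pvRoot par a < n := pvRoot_lt h ha
  have hInv' := pvInv_set h ha ht hts
  have ha' : a < par.length := by rw [h.1]; exact ha
  have hstep := pvStep_set (t := pvRoot par a) ha'
  have hfix' : pvStep (par.set a ((pvRoot par a : Nat) : Int)) (pvRoot par a) = pvRoot par a := by
    rw [hstep]; split <;> simp [hts]
  have claim : ∀ k, ∀ z, z < n →
      pvStep par ((pvStep par)^[k] z) = (pvStep par)^[k] z →
      pvRoot (par.set a ((pvRoot par a : Nat) : Int)) z = pvRoot par z := by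
    intro k
    induction k with
    | zero =>
      intro z hz hfz
      simp only [Function.iterate_zero, id] at hfz
      have hz' : pvRoot par z = z := pvRoot_fix_self hfz
      by_cases hza : z = a
      · subst hza
        have : pvStep (par.set z ((pvRoot par z : Nat) : Int)) z = z := by
          rw [hstep]; simp [hz']
        rw [pvRoot_fix_self this, hz']
      · have : pvStep (par.set a ((pvRoot par a : Nat) : Int)) z = z := by
          rw [hstep, if_neg hza, hfz]
        rw [pvRoot_fix_self this, hz']
    | succ k ih =>
      intro z hz hfz
      by_cases hfzz : pvStep par z = z
      · have hz' : pvRoot par z = z := pvRoot_fix_self hfzz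
        by_cases hza : z = a
        · subst hza
          have : pvStep (par.set z ((pvRoot par z : Nat) : Int)) z = z := by
            rw [hstep]; simp [hz']
          rw [pvRoot_fix_self this, hz']
        · have : pvStep (par.set a ((pvRoot par a : Nat) : Int)) z = z := by
            rw [hstep, if_neg hza, hfzz]
          rw [pvRoot_fix_self this, hz']
      · by_cases hza : z = a
        · subst hza
          have h1 : pvStep (par.set z ((pvRoot par z : Nat) : Int)) z = pvRoot par z := by
            rw [hstep]; simp
          have h2 := pvRoot_step hInv' (x := z) hz
          rw [h1] at h2
          rw [← h2, pvRoot_fix_self hfix']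
        · have h1 : pvStep (par.set a ((pvRoot par a : Nat) : Int)) z = pvStep par z := by
            rw [hstep, if_neg hza]
          have h2 := pvRoot_step hInv' (x := z) hz
          rw [h1] at h2
          have h3 : pvStep par ((pvStep par)^[k] (pvStep par z)) = (pvStep par)^[k] (pvStep par z) := by
            rw [← Function.iterate_succ_apply]; exact hfz
          rw [← h2, ih (pvStep par z) ((h.2.1 z hz).2) h3, pvRoot_step h hz]
  obtain ⟨k, hk, hfix⟩ := pvExists_fix h hy
  exact claim k y hy hfix

lemma pvRoot_set_union {n : Nat} {par : List Int} (h : pvInv n par) {a t : Nat} (ha : a < n)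
    (ht : t < n) (hra : pvStep par a = a) (htr : pvStep par t = t)
    {y : Nat} (hy : y < n) :
    pvRoot (par.set a ((t : Nat) : Int)) y = if pvRoot par y = a then t else pvRoot par y := by
  have hInv' := pvInv_set h ha ht htr
  have ha' : a < par.length := by rw [h.1]; exact ha
  have hstep := pvStep_set (t := t) ha'
  have hfix' : pvStep (par.set a ((t : Nat) : Int)) t = t := by
    rw [hstep]; split <;> simp [htr]
  have claim : ∀ k, ∀ z, z < n →
      pvStep par ((pvStep par)^[k] z) = (pvStep par)^[k] z →
      pvRoot (par.set a ((t : Nat) : Int)) z = if pvRoot par z = a then t else pvRoot par z := by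
    intro k
    induction k with
    | zero =>
      intro z hz hfz
      simp only [Function.iterate_zero, id] at hfz
      have hz' : pvRoot par z = z := pvRoot_fix_self hfz
      by_cases hza : z = a
      · subst hza
        have h1 : pvStep (par.set z ((t : Nat) : Int)) z = t := by rw [hstep]; simp
        have h2 := pvRoot_step hInv' (x := z) hz
        rw [h1] at h2
        rw [← h2, pvRoot_fix_self hfix', hz', if_pos rfl]
      · have : pvStep (par.set a ((t : Nat) : Int)) z = z := by
          rw [hstep, if_neg hza, hfz]
        rw [pvRoot_fix_self this, hz', if_neg hza]
    | succ k ih =>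
      intro z hz hfz
      by_cases hfzz : pvStep par z = z
      · have hz' : pvRoot par z = z := pvRoot_fix_self hfzz
        by_cases hza : z = a
        · subst hza
          have h1 : pvStep (par.set z ((t : Nat) : Int)) z = t := by rw [hstep]; simp
          have h2 := pvRoot_step hInv' (x := z) hz
          rw [h1] at h2
          rw [← h2, pvRoot_fix_self hfix', hz', if_pos rfl]
        · have : pvStep (par.set a ((t : Nat) : Int)) z = z := by
            rw [hstep, if_neg hza, hfzz]
          rw [pvRoot_fix_self this, hz', if_neg hza]
      · have hza : z ≠ a := by
          intro hcon; subst hcon; exact hfzz hra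
        have h1 : pvStep (par.set a ((t : Nat) : Int)) z = pvStep par z := by
          rw [hstep, if_neg hza]
        have h2 := pvRoot_step hInv' (x := z) hz
        rw [h1] at h2
        have h3 : pvStep par ((pvStep par)^[k] (pvStep par z)) = (pvStep par)^[k] (pvStep par z) := by
          rw [← Function.iterate_succ_apply]; exact hfz
        rw [← h2, ih (pvStep par z) ((h.2.1 z hz).2) h3, pvRoot_step h hz]
  obtain ⟨k, hk, hfix⟩ := pvExists_fix h hy
  exact claim k y hy hfix

lemma pvFindA_spec {n : Nat} : ∀ (fuel : Nat) (par : List Int) (x : Nat), pvInv n par → x < n →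
    (∃ k < fuel, pvStep par ((pvStep par)^[k] x) = (pvStep par)^[k] x) →
    (findA fuel par x).2 = pvRoot par x ∧ pvInv n (findA fuel par x).1 ∧
      ∀ y, y < n → pvRoot (findA fuel par x).1 y = pvRoot par y := by
  intro fuel
  induction fuel with
  | zero =>
    intro par x hInv hx hex
    obtain ⟨k, hk, _⟩ := hex
    omega
  | succ fuel ih =>
    intro par x hInv hx hex
    have hget : par.getD x 0 = ((pvStep par x : Nat) : Int) := (hInv.2.1 x hx).1
    by_cases hcond : par.getD x 0 = (x : Int)
    · have hfx : pvStep par x = x := by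
        rw [hget] at hcond
        exact_mod_cast hcond
      have hroot : pvRoot par x = x := pvRoot_fix_self hfx
      have hres0 : findA (fuel+1) par x = (par, x) := by
        rw [findA, if_pos hcond]
      rw [hres0]
      exact ⟨hroot.symm, hInv, fun y _ => rfl⟩
    · have hfx : pvStep par x ≠ x := by
        intro hcon
        apply hcond
        rw [hget, hcon]
      have hlt : pvStep par x < n := (hInv.2.1 x hx).2
      have hex' : ∃ k < fuel, pvStep par ((pvStep par)^[k] (pvStep par x)) =
          (pvStep par)^[k] (pvStep par x) := by
        obtain ⟨k, hk, hfixk⟩ := hex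
        match k, hk with
        | 0, _ =>
          exact absurd (by simpa using hfixk) hfx
        | (k+1), hk =>
          refine ⟨k, by omega, ?_⟩
          rw [← Function.iterate_succ_apply]
          exact hfixk
      have harg : (par.getD x 0).toNat = pvStep par x := by rfl
      obtain ⟨ih1, ih2, ih3⟩ := ih par (pvStep par x) hInv hlt hex'
      have hres : findA (fuel+1) par x =
          ((findA fuel par (pvStep par x)).1.set x (((findA fuel par (pvStep par x)).2 : Nat) : Int),
            (findA fuel par (pvStep par x)).2) := by
        rw [findA, if_neg hcond, harg]
      set r := findA fuel par (pvStep par x) with hr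
      have hr2 : r.2 = pvRoot par x := by rw [ih1, pvRoot_step hInv hx]
      have hr2' : r.2 = pvRoot r.1 x := by rw [hr2, ← ih3 x hx]
      refine ⟨?_, ?_, ?_⟩
    -- value
      · rw [hres]; exact hr2
      · rw [hres]
        simp only
        rw [hr2']
        exact pvInv_set ih2 hx (pvRoot_lt ih2 hx) (pvRoot_isFix ih2 hx)
      · intro y hy
        rw [hres]
        simp only
        rw [hr2', pvRoot_set_compress ih2 hx hy, ih3 y hy]

lemma pvUniteA_spec {n : Nat} {par : List Int} (h : pvInv n par) {a b : Nat} (ha : a < n)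
    (hb : b < n) :
    pvInv n (uniteA n par a b) ∧
      ∀ y, y < n → pvRoot (uniteA n par a b) y =
        if pvRoot par y = pvRoot par a then pvRoot par b else pvRoot par y := by
  have hexa := pvExists_fix h ha
  obtain ⟨fa1, fa2, fa3⟩ := pvFindA_spec n par a h ha
    (by obtain ⟨k, hk, hf⟩ := hexa; exact ⟨k, hk, hf⟩)
  set px := findA n par a with hpx
  have hexb := pvExists_fix fa2 hb
  obtain ⟨fb1, fb2, fb3⟩ := pvFindA_spec n px.1 b fa2 hb
    (by obtain ⟨k, hk, hf⟩ := hexb; exact ⟨k, hk, hf⟩)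
  set py := findA n px.1 b with hpy
  have hra : px.2 = pvRoot par a := fa1
  have hrb : py.2 = pvRoot par b := by rw [fb1, fa3 b hb]
  have hrootsy : ∀ y, y < n → pvRoot py.1 y = pvRoot par y := by
    intro y hy; rw [fb3 y hy, fa3 y hy]
  by_cases heq : px.2 = py.2
  · have hres : uniteA n par a b = py.1 := by
      rw [uniteA]; simp only [← hpx, ← hpy, if_pos heq]
    rw [hres]
    refine ⟨fb2, ?_⟩
    intro y hy
    rw [hrootsy y hy]
    by_cases hc : pvRoot par y = pvRoot par a
    · rw [if_pos hc, hc, hra.symm, heq, hrb]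
    · rw [if_neg hc]
  · have hres : uniteA n par a b = py.1.set px.2 ((py.2 : Nat) : Int) := by
      rw [uniteA]; simp only [← hpx, ← hpy, if_neg heq]
    rw [hres]
    have hpxlt : px.2 < n := by rw [hra]; exact pvRoot_lt h ha
    have hpylt : py.2 < n := by rw [hrb]; exact pvRoot_lt h hb
    have hpxfix : pvStep py.1 px.2 = px.2 := by
      apply pvFix_of_root_self fb2 hpxlt
      rw [hrootsy px.2 hpxlt, hra, pvRoot_fix_self (pvRoot_isFix h ha)]
    have hpyfix : pvStep py.1 py.2 = py.2 := by
      apply pvFix_of_root_self fb2 hpylt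
      rw [hrootsy py.2 hpylt, hrb, pvRoot_fix_self (pvRoot_isFix h hb)]
    refine ⟨pvInv_set fb2 hpxlt hpylt hpyfix, ?_⟩
    intro y hy
    rw [pvRoot_set_union fb2 hpxlt hpylt hpxfix hpyfix hy, hrootsy y hy, hra, hrb]

/- ---------- canonical component lists ---------- -/

def pvVsN (vs : List Int) (i : Nat) : Bool := vs.contains (i : Int)

def pvGoodRho (vs : List Int) (n : Nat) (ρ : Nat → Nat) : Prop :=
  (∀ x, x < n → ρ x < n) ∧ (∀ x, x < n → ρ (ρ x) = ρ x) ∧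
  (∀ x, x < n → pvVsN vs x = true → ρ x = x) ∧
  (∀ x, x < n → pvVsN vs x = false → pvVsN vs (ρ x) = false)

def pvReps (vs : List Int) (n : Nat) (ρ : Nat → Nat) : List Nat :=
  (List.range n).filter (fun i => !pvVsN vs i && decide (∀ j, j < i → ρ j ≠ ρ i))

def pvMembers (n : Nat) (ρ : Nat → Nat) (i : Nat) : List Int :=
  ((List.range n).filter (fun j => ρ j == ρ i)).map (fun j => ((j : Nat) : Int))

def pvCanon (vs : List Int) (n : Nat) (ρ : Nat → Nat) : List (List Int) :=
  (pvReps vs n ρ).map (pvMembers n ρ)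

lemma pvSet_append {α : Type} (l1 l2 : List α) (x v : α) :
    (l1 ++ x :: l2).set l1.length v = l1 ++ v :: l2 := by
  rw [List.set_append_right _ _ (Nat.le_refl _)]
  simp

lemma pvEraseIdx_append {α : Type} (l1 l2 : List α) (x : α) :
    (l1 ++ x :: l2).eraseIdx l1.length = l1 ++ l2 := by
  rw [List.eraseIdx_append_of_length_le (Nat.le_refl _)]
  simp

lemma pvFindIdx?_append {α : Type} (p : α → Bool) (l1 l2 : List α) (x : α)
    (h1 : ∀ y ∈ l1, p y = false) (hx : p x = true) :
    (l1 ++ x :: l2).findIdx? p = some l1.length := by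
  induction l1 with
  | nil => simp [List.findIdx?_cons, hx]
  | cons a t ih =>
    have ha := h1 a (by simp)
    simp only [List.cons_append, List.findIdx?_cons, ha]
    rw [ih (fun y hy => h1 y (by simp [hy]))]
    simp

lemma pvFilter_or_perm {α : Type} (p q : α → Bool) (l : List α)
    (h : ∀ x, ¬(p x = true ∧ q x = true)) :
    (l.filter (fun x => p x || q x)).Perm (l.filter p ++ l.filter q) := by
  induction l with
  | nil => simp
  | cons a t ih =>
    by_cases hp : p a = true
    · have hq : q a = false := by
        rcases Bool.eq_false_or_eq_true (q a) with h' | h'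
        · exact absurd ⟨hp, h'⟩ (h a)
        · exact h'
      simp only [List.filter_cons, hp, hq, Bool.true_or, if_true]
      simpa using ih.cons a
    · have hp' : p a = false := by simpa using hp
      by_cases hq : q a = true
      · simp only [List.filter_cons, hp', hq, Bool.false_or, if_true]
        refine List.Perm.trans (ih.cons a) ?_
        exact List.perm_middle.symm
      · have hq' : q a = false := by simpa using hq
        simp only [List.filter_cons, hp', hq', Bool.false_or]
        exact ih

lemma pvRange_filter_beq {n i : Nat} (h : i < n) :
    (List.range n).filter (fun j => j == i) = [i] := by
  induction n with
  | zero => omega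
  | succ n ih =>
    rw [List.range_succ, List.filter_append]
    by_cases hin : i = n
    · subst hin
      have : (List.range i).filter (fun j => j == i) = [] := by
        apply List.filter_eq_nil_iff.2
        intro j hj
        simp only [beq_iff_eq]
        have := List.mem_range.1 hj
        omega
      simp [this]
    · have hi : i < n := by omega
      rw [ih hi]
      simp [Ne.symm hin]

lemma pvCanon_congr {vs : List Int} {n : Nat} {ρ1 ρ2 : Nat → Nat}
    (h : ∀ x, x < n → ρ1 x = ρ2 x) : pvCanon vs n ρ1 = pvCanon vs n ρ2 := by
  have hreps : pvReps vs n ρ1 = pvReps vs n ρ2 := by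
    apply List.filter_congr
    intro i hi
    have hi' : i < n := List.mem_range.1 hi
    have h1 : ρ1 i = ρ2 i := h i hi'
    congr 1
    simp only [decide_eq_decide]
    constructor
    · intro hall j hj
      rw [← h j (by omega), ← h1]; exact hall j hj
    · intro hall j hj
      rw [h j (by omega), h1]; exact hall j hj
  unfold pvCanon
  rw [hreps]
  apply List.map_congr_left
  intro i hi
  have hi' : i < n := List.mem_range.1 (List.mem_of_mem_filter hi)
  unfold pvMembers
  congr 1
  apply List.filter_congr
  intro j hj
  have hj' : j < n := List.mem_range.1 hj
  rw [h j hj', h i hi']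

lemma pvMembers_contains {n : Nat} {ρ : Nat → Nat} {u i : Nat} (hu : u < n) :
    (pvMembers n ρ i).contains ((u : Nat) : Int) = (ρ u == ρ i) := by
  unfold pvMembers
  rcases Bool.eq_false_or_eq_true (ρ u == ρ i) with h' | h'
  · rw [h']
    simp only [List.contains_eq_mem, List.mem_map, List.mem_filter, List.mem_range,
      decide_eq_true_eq]
    exact ⟨u, ⟨hu, by simpa using h'⟩, rfl⟩
  · rw [h']
    simp only [List.contains_eq_mem, List.mem_map, List.mem_filter, List.mem_range,
      decide_eq_false_iff_not]
    rintro ⟨j, ⟨hj, hρj⟩, hcast⟩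
    have : j = u := by exact_mod_cast hcast
    subst this
    rw [hρj] at h'
    simp at h'

def pvRep (n : Nat) (ρ : Nat → Nat) (u : Nat) : Nat :=
  ((List.range n).filter (fun i => ρ i == ρ u)).headD 0

lemma pvRep_spec {n : Nat} {ρ : Nat → Nat} {u : Nat} (hu : u < n) :
    pvRep n ρ u < n ∧ ρ (pvRep n ρ u) = ρ u ∧
      (∀ j, j < n → ρ j = ρ u → pvRep n ρ u ≤ j) := by
  have hmem : u ∈ (List.range n).filter (fun i => ρ i == ρ u) := by
    simp [List.mem_filter, List.mem_range, hu]
  rcases hS : (List.range n).filter (fun i => ρ i == ρ u) with _ | ⟨hd, tl⟩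
  · rw [hS] at hmem; simp at hmem
  · have hhd : pvRep n ρ u = hd := by rw [pvRep, hS]; rfl
    have hhd_mem : hd ∈ (List.range n).filter (fun i => ρ i == ρ u) := by
      rw [hS]; simp
    have h1 : hd < n := List.mem_range.1 (List.mem_of_mem_filter hhd_mem)
    have h2 : ρ hd = ρ u := by
      have := (List.mem_filter.1 hhd_mem).2
      simpa using this
    have hpw : ((List.range n).filter (fun i => ρ i == ρ u)).Pairwise (· < ·) :=
      List.Pairwise.filter _ List.pairwise_lt_range
    rw [hS] at hpw
    have hmin : ∀ j, j < n → ρ j = ρ u → hd ≤ j := by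
      intro j hj hρj
      have hjmem : j ∈ (List.range n).filter (fun i => ρ i == ρ u) := by
        simp [List.mem_filter, List.mem_range, hj, hρj]
      rw [hS] at hjmem
      rcases List.mem_cons.1 hjmem with h' | h'
      · omega
      · have := (List.pairwise_cons.1 hpw).1 j h'
        omega
    exact hhd ▸ ⟨h1, h2, hmin⟩

lemma pvRep_congr_class {n : Nat} {ρ : Nat → Nat} {u v : Nat} (h : ρ v = ρ u) :
    pvRep n ρ v = pvRep n ρ u := by
  unfold pvRep
  rw [show (fun i => ρ i == ρ v) = (fun i => ρ i == ρ u) from funext (fun i => by rw [h])]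

lemma pvReps_pairwise (vs : List Int) (n : Nat) (ρ : Nat → Nat) :
    (pvReps vs n ρ).Pairwise (· < ·) :=
  List.Pairwise.filter _ List.pairwise_lt_range

lemma pvMem_reps_iff {vs : List Int} {n : Nat} {ρ : Nat → Nat} {i : Nat} :
    i ∈ pvReps vs n ρ ↔ i < n ∧ pvVsN vs i = false ∧ (∀ j, j < i → ρ j ≠ ρ i) := by
  unfold pvReps
  simp [List.mem_filter, List.mem_range]

lemma pvRep_mem_reps {vs : List Int} {n : Nat} {ρ : Nat → Nat} (hρ : pvGoodRho vs n ρ)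
    {u : Nat} (hu : u < n) (hvs : pvVsN vs u = false) : pvRep n ρ u ∈ pvReps vs n ρ := by
  obtain ⟨h1, h2, h3⟩ := pvRep_spec (ρ := ρ) hu
  refine pvMem_reps_iff.2 ⟨h1, ?_, ?_⟩
  · rcases Bool.eq_false_or_eq_true (pvVsN vs (pvRep n ρ u)) with h' | h'
    · exfalso
      have hfix : ρ (pvRep n ρ u) = pvRep n ρ u := hρ.2.2.1 _ h1 h'
      have : pvVsN vs (ρ u) = false := hρ.2.2.2 u hu hvs
      rw [← h2, hfix] at this
      rw [this] at h'
      exact Bool.false_ne_true h'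
    · exact h'
  · intro j hj hcon
    have := h3 j (by omega) (by rw [hcon, h2])
    omega

lemma pvRep_of_mem_reps {vs : List Int} {n : Nat} {ρ : Nat → Nat} {i : Nat}
    (hi : i ∈ pvReps vs n ρ) : pvRep n ρ i = i := by
  obtain ⟨h1, _, h3⟩ := pvMem_reps_iff.1 hi
  obtain ⟨g1, g2, g3⟩ := pvRep_spec (ρ := ρ) h1
  rcases Nat.lt_or_ge (pvRep n ρ i) i with h' | h'
  · exact absurd g2 (h3 _ h')
  · have := g3 i h1 rfl
    omega

lemma pvClass_unique {vs : List Int} {n : Nat} {ρ : Nat → Nat} {i u : Nat}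
    (hi : i ∈ pvReps vs n ρ) (h : ρ i = ρ u) : i = pvRep n ρ u := by
  rw [← pvRep_congr_class h, pvRep_of_mem_reps hi]

lemma pvCanon_init (vs : List Int) (n : Nat) :
    pvCanon vs n (fun x => x) =
      ((PySem.List.pyRange 0 (n : Int) 1).filter (fun i => !vs.contains i)).map (fun i => [i]) := by
  rw [PySem.List.pyRange_zero_nat, List.filter_map, List.map_map]
  unfold pvCanon pvReps
  have h1 : (List.range n).filter
      (fun i => !pvVsN vs i && decide (∀ j, j < i → (fun x => x) j ≠ (fun x => x) i)) =
      (List.range n).filter (fun i => !pvVsN vs i) := by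
    apply List.filter_congr
    intro i _
    have : (decide (∀ j, j < i → (fun x => x) j ≠ (fun x => x) i)) = true := by
      simp only [decide_eq_true_eq]
      intro j hj
      omega
    rw [this, Bool.and_true]
  rw [h1]
  have h2 : ((fun x => !vs.contains x) ∘ fun i : Nat => (i : Int)) = fun i : Nat => !pvVsN vs i := by
    funext i; rfl
  rw [h2]
  apply List.map_congr_left
  intro i hi
  have hi' : i < n := List.mem_range.1 (List.mem_of_mem_filter hi)
  unfold pvMembers
  rw [pvRange_filter_beq hi']
  rfl

lemma pvGetD_append {α : Type} [Inhabited α] (l1 l2 : List α) (x d : α) :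
    (l1 ++ x :: l2).getD l1.length d = x := by
  rw [List.getD, List.getElem?_append_right (Nat.le_refl _)]
  simp

lemma pvCanon_kernel_congr {vs : List Int} {n : Nat} {ρ1 ρ2 : Nat → Nat}
    (h : ∀ i j, i < n → j < n → (ρ1 i = ρ1 j ↔ ρ2 i = ρ2 j)) :
    pvCanon vs n ρ1 = pvCanon vs n ρ2 := by
  have hreps : pvReps vs n ρ1 = pvReps vs n ρ2 := by
    apply List.filter_congr
    intro i hi
    have hi' : i < n := List.mem_range.1 hi
    congr 1
    simp only [decide_eq_decide]
    constructor
    · intro hall j hj hcon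
      exact hall j hj ((h j i (by omega) hi').2 hcon)
    · intro hall j hj hcon
      exact hall j hj ((h j i (by omega) hi').1 hcon)
  unfold pvCanon
  rw [hreps]
  apply List.map_congr_left
  intro i hi
  have hi' : i < n := List.mem_range.1 (List.mem_of_mem_filter hi)
  unfold pvMembers
  congr 1
  apply List.filter_congr
  intro j hj
  have hj' : j < n := List.mem_range.1 hj
  by_cases hc : ρ1 j = ρ1 i
  · simp [hc, (h j i hj' hi').1 hc]
  · have hc2 : ¬(ρ2 j = ρ2 i) := fun hcon => hc ((h j i hj' hi').2 hcon)
    simp [hc, hc2]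

lemma pvRepsMerge {vs : List Int} {n : Nat} {ρ : Nat → Nat} (hρ : pvGoodRho vs n ρ)
    {w1 w2 : Nat} (h1 : w1 < n) (h2 : w2 < n) (hne : ρ w1 ≠ ρ w2)
    (hlt : pvRep n ρ w1 < pvRep n ρ w2) :
    pvReps vs n (fun x => if ρ x = ρ w1 then ρ w2 else ρ x) =
      (pvReps vs n ρ).filter (fun i => i != pvRep n ρ w2) := by
  obtain ⟨hr1lt, hr1, hmin1⟩ := pvRep_spec (ρ := ρ) h1
  obtain ⟨hr2lt, hr2, hmin2⟩ := pvRep_spec (ρ := ρ) h2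
  unfold pvReps
  rw [List.filter_filter]
  apply List.filter_congr
  intro i hi
  have hin : i < n := List.mem_range.1 hi
  by_cases hvs : pvVsN vs i = true
  · simp [hvs]
  · have hvs' : pvVsN vs i = false := by simpa using hvs
    simp only [hvs', Bool.not_false, Bool.true_and]
    by_cases hc2 : ρ i = ρ w2
    · -- class of w2
      by_cases hir2 : i = pvRep n ρ w2
      · -- i = r2 : both sides false
        have hA : ¬(∀ j, j < i → (fun x => if ρ x = ρ w1 then ρ w2 else ρ x) j ≠
            (fun x => if ρ x = ρ w1 then ρ w2 else ρ x) i) := by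
          intro hall
          refine hall (pvRep n ρ w1) (by omega) ?_
          show (if ρ (pvRep n ρ w1) = ρ w1 then ρ w2 else ρ (pvRep n ρ w1)) =
            (if ρ i = ρ w1 then ρ w2 else ρ i)
          rw [if_pos hr1, hc2, if_neg (Ne.symm hne)]
        rw [decide_eq_false hA]
        simp [hir2]
      · -- r2 < i : both sides false
        have hgt : pvRep n ρ w2 < i := by
          have := hmin2 i hin hc2
          omega
        have hA : ¬(∀ j, j < i → (fun x => if ρ x = ρ w1 then ρ w2 else ρ x) j ≠
            (fun x => if ρ x = ρ w1 then ρ w2 else ρ x) i) := by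
          intro hall
          refine hall (pvRep n ρ w2) hgt ?_
          show (if ρ (pvRep n ρ w2) = ρ w1 then ρ w2 else ρ (pvRep n ρ w2)) =
            (if ρ i = ρ w1 then ρ w2 else ρ i)
          rw [hr2, if_neg (Ne.symm hne), hc2, if_neg (Ne.symm hne)]
        have hB : ¬(∀ j, j < i → ρ j ≠ ρ i) := by
          intro hall
          exact hall (pvRep n ρ w2) hgt (by rw [hr2, hc2])
        rw [decide_eq_false hA, decide_eq_false hB]
        simp
    · -- not class of w2
      have hir2 : (i != pvRep n ρ w2) = true := by
        simp only [bne_iff_ne, ne_eq]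
        intro hcon
        rw [hcon, hr2] at hc2
        exact hc2 rfl
      rw [hir2, Bool.true_and]
      by_cases hc1 : ρ i = ρ w1
      · -- class of w1
        congr 1
        simp only [eq_iff_iff]
        constructor
        · intro hall j hj hcon
          apply hall j hj
          simp only [hcon, hc1]
        · intro hall j hj
          show (if ρ j = ρ w1 then ρ w2 else ρ j) ≠ (if ρ i = ρ w1 then ρ w2 else ρ i)
          rw [if_pos hc1]
          by_cases hj1 : ρ j = ρ w1
          · exact absurd (by rw [hj1, hc1]) (hall j hj)
          · rw [if_neg hj1]
            intro hcon
            -- ρ j = ρ w2 with j < i; i minimal in class w1 → i = r1 ; then r2 ≤ j < r1 contra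
            have hieq : i = pvRep n ρ w1 := by
              have hle : pvRep n ρ w1 ≤ i := hmin1 i hin hc1
              rcases Nat.eq_or_lt_of_le hle with h' | h'
              · omega
              · exfalso
                exact hall (pvRep n ρ w1) h' (by rw [hr1, hc1])
            have : pvRep n ρ w2 ≤ j := hmin2 j (by omega) hcon
            omega
      · -- other class
        congr 1
        simp only [eq_iff_iff]
        constructor
        · intro hall j hj hcon
          have hj1 : ρ j ≠ ρ w1 := by
            intro hj1
            rw [hcon] at hj1
            exact hc1 hj1
          exact (hall j hj) (by
            show (if ρ j = ρ w1 then ρ w2 else ρ j) = (if ρ i = ρ w1 then ρ w2 else ρ i)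
            rw [if_neg hj1, if_neg hc1]
            exact hcon)
        · intro hall j hj
          show (if ρ j = ρ w1 then ρ w2 else ρ j) ≠ (if ρ i = ρ w1 then ρ w2 else ρ i)
          by_cases hj1 : ρ j = ρ w1
          · rw [if_pos hj1, if_neg hc1]
            intro hcon2
            exact hc2 hcon2.symm
          · rw [if_neg hj1, if_neg hc1]
            exact hall j hj

lemma pvMembersMerge_other {n : Nat} {ρ : Nat → Nat} {w1 w2 i : Nat}
    (hi1 : ρ i ≠ ρ w1) (hi2 : ρ i ≠ ρ w2) :
    pvMembers n (fun x => if ρ x = ρ w1 then ρ w2 else ρ x) i = pvMembers n ρ i := by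
  unfold pvMembers
  congr 1
  apply List.filter_congr
  intro j _
  show ((if ρ j = ρ w1 then ρ w2 else ρ j) == (if ρ i = ρ w1 then ρ w2 else ρ i)) = (ρ j == ρ i)
  rw [if_neg hi1]
  by_cases hj1 : ρ j = ρ w1
  · rw [if_pos hj1]
    have l : (ρ w2 == ρ i) = false := by simpa using (Ne.symm hi2)
    have r : (ρ j == ρ i) = false := by
      rw [hj1]; simpa using (Ne.symm hi1)
    rw [l, r]
  · rw [if_neg hj1]

lemma pvMembersMerge_r1 {n : Nat} {ρ : Nat → Nat} {w1 w2 : Nat} (h1 : w1 < n) (h2 : w2 < n)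
    (hne : ρ w1 ≠ ρ w2) :
    pvMembers n (fun x => if ρ x = ρ w1 then ρ w2 else ρ x) (pvRep n ρ w1) =
      PySem.List.sorted (pvMembers n ρ (pvRep n ρ w1) ++ pvMembers n ρ (pvRep n ρ w2))
        (fun x => x) false := by
  obtain ⟨hr1lt, hr1, hmin1⟩ := pvRep_spec (ρ := ρ) h1
  obtain ⟨hr2lt, hr2, hmin2⟩ := pvRep_spec (ρ := ρ) h2
  have hperm : (pvMembers n (fun x => if ρ x = ρ w1 then ρ w2 else ρ x) (pvRep n ρ w1)).Perm
      (pvMembers n ρ (pvRep n ρ w1) ++ pvMembers n ρ (pvRep n ρ w2)) := by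
    unfold pvMembers
    have hpt : (List.range n).filter (fun j =>
        (fun x => if ρ x = ρ w1 then ρ w2 else ρ x) j ==
        (fun x => if ρ x = ρ w1 then ρ w2 else ρ x) (pvRep n ρ w1)) =
        (List.range n).filter (fun j => (ρ j == ρ w1) || (ρ j == ρ w2)) := by
      apply List.filter_congr
      intro j _
      show ((if ρ j = ρ w1 then ρ w2 else ρ j) ==
        (if ρ (pvRep n ρ w1) = ρ w1 then ρ w2 else ρ (pvRep n ρ w1))) = _
      rw [if_pos hr1]
      by_cases hj1 : ρ j = ρ w1
      · rw [if_pos hj1]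
        simp [hj1]
      · rw [if_neg hj1]
        simp [hj1]
    rw [hpt]
    have h1' : (List.range n).filter (fun j => ρ j == ρ (pvRep n ρ w1)) =
        (List.range n).filter (fun j => ρ j == ρ w1) := by
      apply List.filter_congr
      intro j _
      rw [hr1]
    have h2' : (List.range n).filter (fun j => ρ j == ρ (pvRep n ρ w2)) =
        (List.range n).filter (fun j => ρ j == ρ w2) := by
      apply List.filter_congr
      intro j _
      rw [hr2]
    rw [h1', h2', ← List.map_append]
    apply List.Perm.map
    apply pvFilter_or_perm
    intro x ⟨hp, hq⟩
    rw [beq_iff_eq] at hp hq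
    exact hne (hp ▸ hq ▸ rfl)
  refine ((PySem.List.sorted_eq_of_perm_of_pairwise_lt _ _ _ hperm ?_).symm)
  unfold pvMembers
  rw [List.pairwise_map]
  apply List.Pairwise.imp (fun {a b} h => ?_) (List.Pairwise.filter _ List.pairwise_lt_range)
  exact_mod_cast h

lemma pvMerge_core {vs : List Int} {n : Nat} {ρ : Nat → Nat} (hρ : pvGoodRho vs n ρ)
    {w1 w2 : Nat} (h1 : w1 < n) (h2 : w2 < n)
    (hv1 : pvVsN vs w1 = false) (hv2 : pvVsN vs w2 = false) (hne : ρ w1 ≠ ρ w2)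
    (hlt : pvRep n ρ w1 < pvRep n ρ w2) :
    ∃ i1 i2 : Nat,
      (pvCanon vs n ρ).findIdx? (fun c => c.contains ((w1 : Nat) : Int)) = some i1 ∧
      (pvCanon vs n ρ).findIdx? (fun c => c.contains ((w2 : Nat) : Int)) = some i2 ∧ i1 < i2 ∧
      ((pvCanon vs n ρ).set i1 (PySem.List.sorted
          ((pvCanon vs n ρ).getD i1 [] ++ (pvCanon vs n ρ).getD i2 []) (fun x => x) false)).eraseIdx i2
        = pvCanon vs n (fun x => if ρ x = ρ w1 then ρ w2 else ρ x) := by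
  obtain ⟨hr1lt, hr1, hmin1⟩ := pvRep_spec (ρ := ρ) h1
  obtain ⟨hr2lt, hr2, hmin2⟩ := pvRep_spec (ρ := ρ) h2
  have hm1 := pvRep_mem_reps hρ h1 hv1
  have hm2 := pvRep_mem_reps hρ h2 hv2
  obtain ⟨A1, B1, hAB⟩ := List.append_of_mem hm1
  have hpw : (pvReps vs n ρ).Pairwise (· < ·) := pvReps_pairwise vs n ρ
  have hm2' : pvRep n ρ w2 ∈ B1 := by
    rw [hAB] at hm2
    rcases List.mem_append.1 hm2 with h' | h'
    · exfalso
      rw [hAB] at hpw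
      have := (List.pairwise_append.1 hpw).2.2 _ h' _ (List.mem_cons_self)
      omega
    · rcases List.mem_cons.1 h' with h'' | h''
      · omega
      · exact h''
  obtain ⟨A2, A3, hB1⟩ := List.append_of_mem hm2'
  have hreps : pvReps vs n ρ = A1 ++ pvRep n ρ w1 :: (A2 ++ pvRep n ρ w2 :: A3) := by
    rw [hAB, hB1]
  -- every rep other than r1 / r2 lies outside both classes
  have hother : ∀ y ∈ pvReps vs n ρ, y ≠ pvRep n ρ w1 → y ≠ pvRep n ρ w2 →
      ρ y ≠ ρ w1 ∧ ρ y ≠ ρ w2 := by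
    intro y hy hy1 hy2
    constructor
    · intro hcon
      exact hy1 (pvClass_unique hy hcon)
    · intro hcon
      exact hy2 (pvClass_unique hy hcon)
  have hnodup : (pvReps vs n ρ).Nodup := hpw.imp (fun {a b} h => Nat.ne_of_lt h)
  -- nodup gives: members of A1, A2, A3 differ from r1 and r2
  have hsplit : ∀ y, (y ∈ A1 ∨ y ∈ A2 ∨ y ∈ A3) → y ≠ pvRep n ρ w1 ∧ y ≠ pvRep n ρ w2 := by
    rw [hreps] at hnodup
    have hnd1 := List.nodup_append.1 hnodup
    have hnd2 := List.nodup_cons.1 hnd1.2.1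
    have hnd3 := List.nodup_append.1 hnd2.2
    have hnd4 := List.nodup_cons.1 hnd3.2.1
    intro y hy
    constructor
    · rcases hy with h' | h' | h'
      · exact hnd1.2.2 y h' _ List.mem_cons_self
      · intro hcon
        subst hcon
        exact hnd2.1 (List.mem_append.2 (Or.inl h'))
      · intro hcon
        subst hcon
        exact hnd2.1 (List.mem_append.2 (Or.inr (List.mem_cons_of_mem _ h')))
    · rcases hy with h' | h' | h'
      · exact hnd1.2.2 y h' _ (List.mem_cons_of_mem _
          (List.mem_append.2 (Or.inr List.mem_cons_self)))
      · exact hnd3.2.2 y h' _ List.mem_cons_self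
      · intro hcon
        subst hcon
        exact hnd4.1 h'
  have hclassfree : ∀ y, (y ∈ A1 ∨ y ∈ A2 ∨ y ∈ A3) → ρ y ≠ ρ w1 ∧ ρ y ≠ ρ w2 := by
    intro y hy
    have hyreps : y ∈ pvReps vs n ρ := by
      rw [hreps]
      rcases hy with h' | h' | h'
      · exact List.mem_append.2 (Or.inl h')
      · exact List.mem_append.2 (Or.inr (List.mem_cons_of_mem _ (List.mem_append.2 (Or.inl h'))))
      · exact List.mem_append.2 (Or.inr (List.mem_cons_of_mem _
          (List.mem_append.2 (Or.inr (List.mem_cons_of_mem _ h')))))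
    exact hother y hyreps (hsplit y hy).1 (hsplit y hy).2
  -- the canonical list, decomposed
  have hcanon : pvCanon vs n ρ =
      A1.map (pvMembers n ρ) ++ pvMembers n ρ (pvRep n ρ w1) ::
        (A2.map (pvMembers n ρ) ++ pvMembers n ρ (pvRep n ρ w2) :: A3.map (pvMembers n ρ)) := by
    rw [pvCanon, hreps]
    simp [List.map_append]
  -- findIdx? for w1
  have hfind1 : (pvCanon vs n ρ).findIdx? (fun c => c.contains ((w1 : Nat) : Int)) =
      some A1.length := by
    rw [hcanon]
    have := pvFindIdx?_append (fun c => c.contains ((w1 : Nat) : Int))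
      (A1.map (pvMembers n ρ))
      (A2.map (pvMembers n ρ) ++ pvMembers n ρ (pvRep n ρ w2) :: A3.map (pvMembers n ρ))
      (pvMembers n ρ (pvRep n ρ w1))
      (by
        intro y hy
        obtain ⟨a, ha, rfl⟩ := List.mem_map.1 hy
        show (pvMembers n ρ a).contains ((w1 : Nat) : Int) = false
        rw [pvMembers_contains h1]
        have := (hclassfree a (Or.inl ha)).1
        simpa using fun hcon => this hcon.symm)
      (by
        show (pvMembers n ρ (pvRep n ρ w1)).contains ((w1 : Nat) : Int) = true
        rw [pvMembers_contains h1, hr1]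
        simp)
    rw [this]
    simp
  have hfind2 : (pvCanon vs n ρ).findIdx? (fun c => c.contains ((w2 : Nat) : Int)) =
      some (A1.length + 1 + A2.length) := by
    have hcanon2 : pvCanon vs n ρ =
        (A1.map (pvMembers n ρ) ++ pvMembers n ρ (pvRep n ρ w1) :: A2.map (pvMembers n ρ)) ++
          pvMembers n ρ (pvRep n ρ w2) :: A3.map (pvMembers n ρ) := by
      rw [hcanon]
      simp only [List.cons_append, List.append_assoc]
    rw [hcanon2]
    have := pvFindIdx?_append (fun c => c.contains ((w2 : Nat) : Int))
      (A1.map (pvMembers n ρ) ++ pvMembers n ρ (pvRep n ρ w1) :: A2.map (pvMembers n ρ))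
      (A3.map (pvMembers n ρ))
      (pvMembers n ρ (pvRep n ρ w2))
      (by
        intro y hy
        rcases List.mem_append.1 hy with h' | h'
        · obtain ⟨a, ha, rfl⟩ := List.mem_map.1 h'
          show (pvMembers n ρ a).contains ((w2 : Nat) : Int) = false
          rw [pvMembers_contains h2]
          have := (hclassfree a (Or.inl ha)).2
          simpa using fun hcon => this hcon.symm
        · rcases List.mem_cons.1 h' with h'' | h''
          · subst h''
            show (pvMembers n ρ (pvRep n ρ w1)).contains ((w2 : Nat) : Int) = false
            rw [pvMembers_contains h2, hr1]
            simpa using fun hcon => hne hcon.symm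
          · obtain ⟨a, ha, rfl⟩ := List.mem_map.1 h''
            show (pvMembers n ρ a).contains ((w2 : Nat) : Int) = false
            rw [pvMembers_contains h2]
            have := (hclassfree a (Or.inr (Or.inl ha))).2
            simpa using fun hcon => this hcon.symm)
      (by
        show (pvMembers n ρ (pvRep n ρ w2)).contains ((w2 : Nat) : Int) = true
        rw [pvMembers_contains h2, hr2]
        simp)
    rw [this]
    simp
    omega
  refine ⟨A1.length, A1.length + 1 + A2.length, hfind1, hfind2, by omega, ?_⟩
  -- getD values
  have hget1 : (pvCanon vs n ρ).getD A1.length [] = pvMembers n ρ (pvRep n ρ w1) := by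
    rw [hcanon]
    have : A1.length = (A1.map (pvMembers n ρ)).length := by simp
    rw [this, pvGetD_append]
  have hget2 : (pvCanon vs n ρ).getD (A1.length + 1 + A2.length) [] =
      pvMembers n ρ (pvRep n ρ w2) := by
    have hcanon2 : pvCanon vs n ρ =
        (A1.map (pvMembers n ρ) ++ pvMembers n ρ (pvRep n ρ w1) :: A2.map (pvMembers n ρ)) ++
          pvMembers n ρ (pvRep n ρ w2) :: A3.map (pvMembers n ρ) := by
      rw [hcanon]; simp only [List.cons_append, List.append_assoc]
    rw [hcanon2]
    have : A1.length + 1 + A2.length =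
        (A1.map (pvMembers n ρ) ++ pvMembers n ρ (pvRep n ρ w1) :: A2.map (pvMembers n ρ)).length := by
      simp; omega
    rw [this, pvGetD_append]
  rw [hget1, hget2]
  -- set then eraseIdx
  have hset : ((pvCanon vs n ρ).set A1.length (PySem.List.sorted
      (pvMembers n ρ (pvRep n ρ w1) ++ pvMembers n ρ (pvRep n ρ w2)) (fun x => x) false)) =
      (A1.map (pvMembers n ρ) ++ PySem.List.sorted
        (pvMembers n ρ (pvRep n ρ w1) ++ pvMembers n ρ (pvRep n ρ w2)) (fun x => x) false ::
        (A2.map (pvMembers n ρ) ++ pvMembers n ρ (pvRep n ρ w2) :: A3.map (pvMembers n ρ))) := by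
    rw [hcanon]
    have : A1.length = (A1.map (pvMembers n ρ)).length := by simp
    rw [this, pvSet_append]
  rw [hset]
  have herase : (A1.map (pvMembers n ρ) ++ PySem.List.sorted
      (pvMembers n ρ (pvRep n ρ w1) ++ pvMembers n ρ (pvRep n ρ w2)) (fun x => x) false ::
      (A2.map (pvMembers n ρ) ++ pvMembers n ρ (pvRep n ρ w2) :: A3.map (pvMembers n ρ))).eraseIdx
        (A1.length + 1 + A2.length) =
      A1.map (pvMembers n ρ) ++ PySem.List.sorted
        (pvMembers n ρ (pvRep n ρ w1) ++ pvMembers n ρ (pvRep n ρ w2)) (fun x => x) false ::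
        (A2.map (pvMembers n ρ) ++ A3.map (pvMembers n ρ)) := by
    have hassoc : A1.map (pvMembers n ρ) ++ PySem.List.sorted
        (pvMembers n ρ (pvRep n ρ w1) ++ pvMembers n ρ (pvRep n ρ w2)) (fun x => x) false ::
        (A2.map (pvMembers n ρ) ++ pvMembers n ρ (pvRep n ρ w2) :: A3.map (pvMembers n ρ)) =
        (A1.map (pvMembers n ρ) ++ PySem.List.sorted
          (pvMembers n ρ (pvRep n ρ w1) ++ pvMembers n ρ (pvRep n ρ w2)) (fun x => x) false ::
          A2.map (pvMembers n ρ)) ++ pvMembers n ρ (pvRep n ρ w2) :: A3.map (pvMembers n ρ) := by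
      simp
    rw [hassoc]
    have hlen : A1.length + 1 + A2.length =
        (A1.map (pvMembers n ρ) ++ PySem.List.sorted
          (pvMembers n ρ (pvRep n ρ w1) ++ pvMembers n ρ (pvRep n ρ w2)) (fun x => x) false ::
          A2.map (pvMembers n ρ)).length := by
      simp; omega
    rw [hlen, pvEraseIdx_append]
    simp
  rw [herase]
  -- now the right-hand side
  rw [pvCanon, pvRepsMerge hρ h1 h2 hne hlt, hreps]
  have hfA1 : A1.filter (fun i => i != pvRep n ρ w2) = A1 := by
    apply List.filter_eq_self.2
    intro y hy
    simpa using (hsplit y (Or.inl hy)).2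
  have hfA2 : A2.filter (fun i => i != pvRep n ρ w2) = A2 := by
    apply List.filter_eq_self.2
    intro y hy
    simpa using (hsplit y (Or.inr (Or.inl hy))).2
  have hfA3 : A3.filter (fun i => i != pvRep n ρ w2) = A3 := by
    apply List.filter_eq_self.2
    intro y hy
    simpa using (hsplit y (Or.inr (Or.inr hy))).2
  have hfr1 : ((pvRep n ρ w1 : Nat) != pvRep n ρ w2) = true := by
    simpa using Nat.ne_of_lt hlt
  rw [List.filter_append, List.filter_cons, List.filter_append, List.filter_cons]
  rw [hfA1, hfA2, hfA3, hfr1]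
  simp only [bne_self_eq_false, if_true]
  rw [List.map_append, List.map_cons, List.map_append]
  congr 1
  · -- A1 side
    apply List.map_congr_left
    intro y hy
    exact (pvMembersMerge_other (hclassfree y (Or.inl hy)).1 (hclassfree y (Or.inl hy)).2).symm
  congr 1
  · -- merged block
    exact (pvMembersMerge_r1 h1 h2 hne).symm
  congr 1
  · apply List.map_congr_left
    intro y hy
    exact (pvMembersMerge_other (hclassfree y (Or.inr (Or.inl hy))).1
      (hclassfree y (Or.inr (Or.inl hy))).2).symm
  · apply List.map_congr_left
    intro y hy
    exact (pvMembersMerge_other (hclassfree y (Or.inr (Or.inr hy))).1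
      (hclassfree y (Or.inr (Or.inr hy))).2).symm

lemma pvFindIdx?_congr {α : Type} {p q : α → Bool} : ∀ (l : List α),
    (∀ x ∈ l, p x = q x) → l.findIdx? p = l.findIdx? q := by
  intro l
  induction l with
  | nil => intro _; rfl
  | cons a t ih =>
    intro h
    rw [List.findIdx?_cons, List.findIdx?_cons, h a (by simp), ih (fun x hx => h x (by simp [hx]))]

lemma pvFindIdx_block {vs : List Int} {n : Nat} {ρ : Nat → Nat} (hρ : pvGoodRho vs n ρ)
    {w : Nat} (hw : w < n) :
    (pvCanon vs n ρ).findIdx? (fun c => c.contains ((w : Nat) : Int)) =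
      (pvReps vs n ρ).findIdx? (fun i => ρ w == ρ i) := by
  unfold pvCanon
  rw [List.findIdx?_map]
  apply pvFindIdx?_congr
  intro x _
  show (pvMembers n ρ x).contains ((w : Nat) : Int) = (ρ w == ρ x)
  exact pvMembers_contains hw

lemma pvMergeKernel {ρ : Nat → Nat} {u v : Nat} (hne : ρ u ≠ ρ v) (i j : Nat) :
    ((if ρ i = ρ u then ρ v else ρ i) = (if ρ j = ρ u then ρ v else ρ j)) ↔
      ((if ρ i = ρ v then ρ u else ρ i) = (if ρ j = ρ v then ρ u else ρ j)) := by
  by_cases hiu : ρ i = ρ u <;> by_cases hju : ρ j = ρ u <;>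
    by_cases hiv : ρ i = ρ v <;> by_cases hjv : ρ j = ρ v <;>
    simp_all <;> constructor <;> intro h <;> first
      | rfl
      | (exact absurd h (by simp_all))
      | (exact absurd h.symm (by simp_all))
      | simp_all

lemma pvMergeStepB_spec {vs : List Int} {n : Nat} {ρ : Nat → Nat} (hρ : pvGoodRho vs n ρ)
    {e : List Int} {u v : Nat} (hu : u < n) (hv : v < n)
    (he0 : PySem.List.pyGetD e 0 0 = ((u : Nat) : Int)) (he1 : PySem.List.pyGetD e 1 0 = ((v : Nat) : Int))
    (hu_vs : vs.contains ((u : Nat) : Int) = false) (hv_vs : vs.contains ((v : Nat) : Int) = false) :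
    mergeStepB vs (pvCanon vs n ρ) e =
      pvCanon vs n (fun x => if ρ x = ρ u then ρ v else ρ x) := by
  rw [mergeStepB, he0, he1]
  simp only [hu_vs, hv_vs, Bool.false_eq_true, if_false]
  by_cases hcase : ρ u = ρ v
  · -- same class: nothing happens on either side
    have hfu := pvFindIdx_block (vs := vs) hρ hu
    have hfv := pvFindIdx_block (vs := vs) hρ hv
    have hsame : (pvReps vs n ρ).findIdx? (fun i => ρ u == ρ i) =
        (pvReps vs n ρ).findIdx? (fun i => ρ v == ρ i) := by
      apply pvFindIdx?_congr
      intro x _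
      rw [hcase]
    have hex : pvRep n ρ u ∈ pvReps vs n ρ := pvRep_mem_reps hρ hu hu_vs
    have hexists : ∃ k, (pvReps vs n ρ).findIdx? (fun i => ρ u == ρ i) = some k := by
      rcases hfound : (pvReps vs n ρ).findIdx? (fun i => ρ u == ρ i) with _ | k
      · exfalso
        have := List.findIdx?_eq_none_iff.1 hfound
        have h' := this (pvRep n ρ u) hex
        rw [(pvRep_spec (ρ := ρ) hu).2.1] at h'
        simp at h'
      · exact ⟨k, rfl⟩
    obtain ⟨k, hk⟩ := hexists
    have hk' : (pvReps vs n ρ).findIdx? (fun i => ρ v == ρ i) = some k := by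
      rw [← hsame]; exact hk
    rw [hfu, hfv, hk, hk']
    dsimp only
    rw [if_pos rfl]
    apply pvCanon_congr
    intro x _
    by_cases hx : ρ x = ρ u
    · simp [hx, hcase]
    · simp [hx]
  · -- distinct classes
    have hrne : pvRep n ρ u ≠ pvRep n ρ v := by
      intro hcon
      have g1 := (pvRep_spec (ρ := ρ) hu).2.1
      have g2 := (pvRep_spec (ρ := ρ) hv).2.1
      rw [hcon, g2] at g1
      exact hcase g1.symm
    rcases Nat.lt_or_ge (pvRep n ρ u) (pvRep n ρ v) with hlt | hge
    · obtain ⟨i1, i2, hf1, hf2, hi12, heq⟩ := pvMerge_core hρ hu hv hu_vs hv_vs hcase hlt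
      rw [hf1, hf2]
      dsimp only
      rw [if_neg (by omega)]
      simp only [Nat.min_def, Nat.max_def, if_pos (Nat.le_of_lt hi12)]
      exact heq
    · have hlt' : pvRep n ρ v < pvRep n ρ u := by omega
      obtain ⟨i1, i2, hf1, hf2, hi12, heq⟩ := pvMerge_core hρ hv hu hv_vs hu_vs
        (fun h => hcase h.symm) hlt'
      rw [hf2, hf1]
      dsimp only
      rw [if_neg (by omega)]
      simp only [Nat.min_def, Nat.max_def, if_neg (show ¬ i2 ≤ i1 by omega)]
      rw [heq]
      apply pvCanon_kernel_congr
      intro i j _ _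
      exact pvMergeKernel (fun h => hcase h.symm) i j

/- ---------- the grouping loop of A ---------- -/

def pvPureStep (vs : List Int) (ρ : Nat → Nat) (d : PySem.Dict Int (List Int)) (i : Int) :
    PySem.Dict Int (List Int) :=
  if vs.contains ((ρ i.toNat : Nat) : Int) then d
  else if d.contains ((ρ i.toNat : Nat) : Int) then
    d.modify ((ρ i.toNat : Nat) : Int) [] (· ++ [i])
  else d.insert ((ρ i.toNat : Nat) : Int) [i]

def pvRepsA (vs : List Int) (ρ : Nat → Nat) (k : Nat) : List Nat :=
  (List.range k).filter (fun i => !pvVsN vs (ρ i) && decide (∀ j, j < i → ρ j ≠ ρ i))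

def pvMembersK (ρ : Nat → Nat) (k i : Nat) : List Int :=
  ((List.range k).filter (fun j => ρ j == ρ i)).map (fun j => ((j : Nat) : Int))

def pvItems (vs : List Int) (ρ : Nat → Nat) (k : Nat) : List (Int × List Int) :=
  (pvRepsA vs ρ k).map (fun i => (((ρ i : Nat) : Int), pvMembersK ρ k i))

lemma pvRepsA_lt {vs : List Int} {ρ : Nat → Nat} {k y : Nat} (hy : y ∈ pvRepsA vs ρ k) :
    y < k :=
  List.mem_range.1 (List.mem_of_mem_filter hy)

lemma pvRepsA_min {vs : List Int} {ρ : Nat → Nat} {k y : Nat} (hy : y ∈ pvRepsA vs ρ k) :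
    pvVsN vs (ρ y) = false ∧ ∀ j, j < y → ρ j ≠ ρ y := by
  have := (List.mem_filter.1 hy).2
  simp only [Bool.and_eq_true, Bool.not_eq_eq_eq_not, Bool.not_true, decide_eq_true_eq] at this
  exact this

lemma pvRepsA_succ (vs : List Int) (ρ : Nat → Nat) (k : Nat) :
    pvRepsA vs ρ (k+1) = pvRepsA vs ρ k ++
      (if (!pvVsN vs (ρ k) && decide (∀ j, j < k → ρ j ≠ ρ k)) = true then [k] else []) := by
  unfold pvRepsA
  rw [List.range_succ, List.filter_append, List.filter_cons]
  split
  · simp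
  · simp

lemma pvMembersK_succ (ρ : Nat → Nat) (k i : Nat) :
    pvMembersK ρ (k+1) i = pvMembersK ρ k i ++
      (if ρ k = ρ i then [((k : Nat) : Int)] else []) := by
  unfold pvMembersK
  rw [List.range_succ, List.filter_append, List.filter_cons]
  by_cases h : ρ k = ρ i
  · rw [if_pos h, if_pos (by simpa using h)]
    simp
  · rw [if_neg h, if_neg (by simpa using h)]
    simp

lemma pvRepsA_distinct {vs : List Int} {ρ : Nat → Nat} {k : Nat} :
    ∀ i1 ∈ pvRepsA vs ρ k, ∀ i2 ∈ pvRepsA vs ρ k, i1 ≠ i2 → ρ i1 ≠ ρ i2 := by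
  intro i1 h1 i2 h2 hne
  rcases Nat.lt_or_ge i1 i2 with h' | h'
  · exact fun hcon => (pvRepsA_min h2).2 i1 h' hcon
  · have h'' : i2 < i1 := by omega
    exact fun hcon => (pvRepsA_min h1).2 i2 h'' hcon.symm

lemma pvItems_succ_skip {vs : List Int} {ρ : Nat → Nat} {k : Nat}
    (h1 : pvVsN vs (ρ k) = true) :
    pvItems vs ρ (k+1) = pvItems vs ρ k := by
  unfold pvItems
  rw [pvRepsA_succ]
  have hcond : (!pvVsN vs (ρ k) && decide (∀ j, j < k → ρ j ≠ ρ k)) = false := by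
    rw [h1]; rfl
  rw [hcond]
  simp only [Bool.false_eq_true, if_false, List.append_nil]
  apply List.map_congr_left
  intro i hi
  rw [pvMembersK_succ]
  have : ¬(ρ k = ρ i) := by
    intro hcon
    rw [hcon] at h1
    rw [(pvRepsA_min hi).1] at h1
    exact Bool.false_ne_true h1
  rw [if_neg this]
  simp

lemma pvItems_succ_app {vs : List Int} {ρ : Nat → Nat} {k i0 : Nat}
    (hi0 : i0 ∈ pvRepsA vs ρ k) (hi0ρ : ρ i0 = ρ k) :
    pvItems vs ρ (k+1) = (pvItems vs ρ k).map (fun p =>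
      if p.1 == ((ρ k : Nat) : Int) then (((ρ k : Nat) : Int), pvMembersK ρ k i0 ++ [((k : Nat) : Int)])
      else p) := by
  unfold pvItems
  rw [pvRepsA_succ]
  have hcond : (!pvVsN vs (ρ k) && decide (∀ j, j < k → ρ j ≠ ρ k)) = false := by
    have : (decide (∀ j, j < k → ρ j ≠ ρ k)) = false := by
      simp only [decide_eq_false_iff_not]
      intro hall
      exact hall i0 (pvRepsA_lt hi0) hi0ρ
    rw [this]
    simp
  rw [hcond]
  simp only [Bool.false_eq_true, if_false, List.append_nil, List.map_map]
  apply List.map_congr_left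
  intro i hi
  show (((ρ i : Nat) : Int), pvMembersK ρ (k+1) i) =
    if ((((ρ i : Nat) : Int)) == ((ρ k : Nat) : Int)) = true
    then (((ρ k : Nat) : Int), pvMembersK ρ k i0 ++ [((k : Nat) : Int)])
    else (((ρ i : Nat) : Int), pvMembersK ρ k i)
  by_cases hc : ρ i = ρ k
  · have hkey : (((ρ i : Nat) : Int) == ((ρ k : Nat) : Int)) = true := by
      simp [hc]
    rw [if_pos hkey]
    have hmm : pvMembersK ρ k i = pvMembersK ρ k i0 := by
      unfold pvMembersK
      congr 1
      apply List.filter_congr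
      intro j _
      rw [hc, hi0ρ]
    rw [pvMembersK_succ, if_pos hc.symm, hmm, hc]
  · have hkey : (((ρ i : Nat) : Int) == ((ρ k : Nat) : Int)) = false := by
      simpa using fun hcon => hc (by exact_mod_cast hcon)
    rw [if_neg (by rw [hkey]; exact Bool.false_ne_true)]
    rw [pvMembersK_succ, if_neg (fun h => hc h.symm)]
    simp

lemma pvItems_succ_new {vs : List Int} {ρ : Nat → Nat} {k : Nat}
    (h1 : pvVsN vs (ρ k) = false) (hnew : ∀ j, j < k → ρ j ≠ ρ k) :
    pvItems vs ρ (k+1) = pvItems vs ρ k ++ [(((ρ k : Nat) : Int), [((k : Nat) : Int)])] := by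
  unfold pvItems
  rw [pvRepsA_succ]
  have hcond : (!pvVsN vs (ρ k) && decide (∀ j, j < k → ρ j ≠ ρ k)) = true := by
    rw [h1]
    simp only [Bool.not_false, Bool.true_and, decide_eq_true_eq]
    exact hnew
  rw [hcond]
  simp only [if_true, List.map_append, List.map_singleton]
  congr 1
  · apply List.map_congr_left
    intro i hi
    rw [pvMembersK_succ]
    have : ¬(ρ k = ρ i) := fun hcon => hnew i (pvRepsA_lt hi) hcon.symm
    rw [if_neg this]
    simp
  · have : pvMembersK ρ (k+1) k = [((k : Nat) : Int)] := by
      rw [pvMembersK_succ, if_pos rfl]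
      have : pvMembersK ρ k k = [] := by
        unfold pvMembersK
        have : (List.range k).filter (fun j => ρ j == ρ k) = [] := by
          apply List.filter_eq_nil_iff.2
          intro j hj
          simpa using hnew j (List.mem_range.1 hj)
        rw [this]
        rfl
      rw [this]
      rfl
    rw [this]

lemma pvGroup_decouple {vs : List Int} {n : Nat} {ρ : Nat → Nat} :
    ∀ (l : List Int), (∀ i ∈ l, 0 ≤ i ∧ i.toNat < n) →
    ∀ (par : List Int) (d : PySem.Dict Int (List Int)), pvInv n par →
    (∀ y, y < n → pvRoot par y = ρ y) →
    (l.foldl (groupStepA vs) (par, d)).2 = l.foldl (pvPureStep vs ρ) d := by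
  intro l
  induction l with
  | nil => intro _ par d _ _; rfl
  | cons i t ih =>
    intro hmem par d hInv hroots
    have hi := hmem i (by simp)
    have hL : par.length = n := hInv.1
    obtain ⟨f1, f2, f3⟩ := pvFindA_spec n par i.toNat hInv hi.2
      (by
        obtain ⟨k, hk, hf⟩ := pvExists_fix hInv hi.2
        exact ⟨k, hk, hf⟩)
    have hstep : groupStepA vs (par, d) i =
        ((findA n par i.toNat).1, pvPureStep vs ρ d i) := by
      rw [groupStepA]
      simp only [hL]
      rw [pvPureStep]
      have hval : (findA n par i.toNat).2 = ρ i.toNat := by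
        rw [f1, hroots i.toNat hi.2]
      rw [hval]
      by_cases h1 : vs.contains ((ρ i.toNat : Nat) : Int) = true
      · rw [if_pos h1, if_pos h1]
      · rw [if_neg h1, if_neg h1]
        by_cases h2 : d.contains ((ρ i.toNat : Nat) : Int) = true
        · rw [if_pos h2, if_pos h2]
        · rw [if_neg h2, if_neg h2]
    rw [List.foldl_cons, List.foldl_cons, hstep]
    exact ih (fun j hj => hmem j (by simp [hj])) (findA n par i.toNat).1 _ f2
      (fun y hy => by rw [f3 y hy, hroots y hy])

lemma pvFind?_append {α : Type} (p : α → Bool) (l1 l2 : List α) (x : α)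
    (h1 : ∀ y ∈ l1, p y = false) (hx : p x = true) :
    (l1 ++ x :: l2).find? p = some x := by
  induction l1 with
  | nil => simp [hx]
  | cons a t ih =>
    have ha := h1 a (by simp)
    simp only [List.cons_append, List.find?_cons, ha]
    exact ih (fun y hy => h1 y (by simp [hy]))

lemma pvPure_items {vs : List Int} {ρ : Nat → Nat} : ∀ (k : Nat),
    ((PySem.List.pyRange 0 (k : Int) 1).foldl (pvPureStep vs ρ) PySem.Dict.empty).items =
      pvItems vs ρ k := by
  intro k
  induction k with
  | zero =>
    simp [pvItems, pvRepsA, PySem.Dict.empty]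
  | succ k ih =>
    have hrange : PySem.List.pyRange 0 ((k+1 : Nat) : Int) 1 =
        PySem.List.pyRange 0 (k : Int) 1 ++ [(k : Int)] := by
      have : ((k+1 : Nat) : Int) = (k : Int) + 1 := by push_cast; ring
      rw [this, PySem.List.pyRange_one_succ_right (by positivity)]
    rw [hrange, List.foldl_append]
    set d := (PySem.List.pyRange 0 (k : Int) 1).foldl (pvPureStep vs ρ) PySem.Dict.empty with hd
    simp only [List.foldl_cons, List.foldl_nil]
    have htoNat : ((k : Int)).toNat = k := by simp
    have hcontains : ∀ c : Int, d.contains c =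
        (pvRepsA vs ρ k).any (fun i => ((ρ i : Nat) : Int) == c) := by
      intro c
      show d.items.any (fun p => p.1 == c) = _
      rw [ih]
      unfold pvItems
      rw [List.any_map]
      rfl
    have hcontains_iff : ∀ c : Int, d.contains c = true ↔
        ∃ i ∈ pvRepsA vs ρ k, ((ρ i : Nat) : Int) = c := by
      intro c
      rw [hcontains]
      simp [List.any_eq_true]
    rw [pvPureStep, htoNat]
    by_cases h1 : vs.contains ((ρ k : Nat) : Int) = true
    · rw [if_pos h1, ih, pvItems_succ_skip h1]
    · rw [if_neg h1]
      have h1' : pvVsN vs (ρ k) = false := by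
        cases hb : vs.contains ((ρ k : Nat) : Int)
        · exact hb
        · exact absurd hb h1
      by_cases h2 : d.contains ((ρ k : Nat) : Int) = true
      · rw [if_pos h2]
        obtain ⟨i0, hi0mem, hi0key⟩ := (hcontains_iff _).1 h2
        have hi0ρ : ρ i0 = ρ k := by exact_mod_cast hi0key
        have hgetD : d.getD ((ρ k : Nat) : Int) [] = pvMembersK ρ k i0 := by
          obtain ⟨L1, L2, hdec⟩ := List.append_of_mem hi0mem
          have hnd : (pvRepsA vs ρ k).Nodup :=
            (List.Pairwise.filter _ List.pairwise_lt_range).imp (fun {a b} h => Nat.ne_of_lt h)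
          have hL1 : ∀ y ∈ L1, ρ y ≠ ρ k := by
            intro y hy
            have hymem : y ∈ pvRepsA vs ρ k := by rw [hdec]; simp [hy]
            have hyne : y ≠ i0 := by
              intro hcon
              subst hcon
              rw [hdec] at hnd
              exact (List.nodup_append.1 hnd).2.2 y hy _ List.mem_cons_self rfl
            intro hcon
            exact pvRepsA_distinct y hymem i0 hi0mem hyne (by rw [hcon, hi0ρ])
          show ((Option.map (fun x => x.2)
            (List.find? (fun p => p.1 == ((ρ k : Nat) : Int)) d.items)).getD []) = _
          rw [ih]
          unfold pvItems
          rw [hdec, List.map_append, List.map_cons]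
          rw [pvFind?_append _ _ _ _
            (by
              intro y hy
              obtain ⟨a, ha, rfl⟩ := List.mem_map.1 hy
              simp only [beq_eq_false_iff_ne, ne_eq]
              intro hcon
              have : ρ a = ρ k := by exact_mod_cast hcon
              exact hL1 a ha this)
            (by simp [hi0ρ])]
          rfl
        have hmod : (d.modify ((ρ k : Nat) : Int) [] (· ++ [(k : Int)])).items =
            d.items.map (fun p => if p.1 == ((ρ k : Nat) : Int)
              then (((ρ k : Nat) : Int), pvMembersK ρ k i0 ++ [(k : Int)]) else p) := by
          show (d.insert _ (d.getD ((ρ k : Nat) : Int) [] ++ [(k : Int)])).items = _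
          rw [PySem.Dict.insert, if_pos h2, hgetD]
        rw [hmod, ih, pvItems_succ_app hi0mem hi0ρ]
      · rw [if_neg h2]
        have hnew : ∀ j, j < k → ρ j ≠ ρ k := by
          intro j hj hcon
          have hexd : ∃ j', j' < k ∧ ρ j' = ρ k := ⟨j, hj, hcon⟩
          classical
          have hj0 := Nat.find_spec hexd
          have hj0rep : Nat.find hexd ∈ pvRepsA vs ρ k := by
            unfold pvRepsA
            rw [List.mem_filter]
            refine ⟨List.mem_range.2 hj0.1, ?_⟩
            have hv : pvVsN vs (ρ (Nat.find hexd)) = false := by rw [hj0.2]; exact h1'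
            rw [hv]
            simp only [Bool.not_false, Bool.true_and, decide_eq_true_eq]
            intro m hm hcon2
            exact Nat.find_min hexd hm ⟨by omega, hcon2.trans hj0.2⟩
          exact absurd ((hcontains_iff _).2 ⟨Nat.find hexd, hj0rep, by rw [hj0.2]⟩) h2
        have hins : (d.insert ((ρ k : Nat) : Int) [(k : Int)]).items =
            d.items ++ [(((ρ k : Nat) : Int), [(k : Int)])] := by
          rw [PySem.Dict.insert]
          rw [if_neg (by simpa using h2)]
        rw [hins, ih, pvItems_succ_new h1' hnew]

lemma pvGroup_spec {vs : List Int} {n : Nat} {par : List Int} (h : pvInv n par)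
    (hρ : pvGoodRho vs n (pvRoot par)) :
    ((PySem.List.pyRange 0 (n : Int) 1).foldl (groupStepA vs)
        (par, (PySem.Dict.empty : PySem.Dict Int (List Int)))).2.values =
      pvCanon vs n (pvRoot par) := by
  have hdec := pvGroup_decouple (vs := vs) (n := n) (ρ := pvRoot par)
    (PySem.List.pyRange 0 (n : Int) 1)
    (by
      intro i hi
      rw [PySem.List.mem_pyRange_one] at hi
      constructor
      · omega
      · omega)
    par PySem.Dict.empty h (fun y _ => rfl)
  show ((PySem.List.pyRange 0 (n : Int) 1).foldl (groupStepA vs)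
      (par, (PySem.Dict.empty : PySem.Dict Int (List Int)))).2.items.map (fun p => p.2) = _
  rw [hdec]
  rw [pvPure_items (vs := vs) (ρ := pvRoot par) n]
  unfold pvItems pvCanon
  rw [List.map_map]
  have hreps : pvRepsA vs (pvRoot par) n = pvReps vs n (pvRoot par) := by
    unfold pvRepsA pvReps
    apply List.filter_congr
    intro i hi
    have hi' : i < n := List.mem_range.1 hi
    congr 1
    rcases Bool.eq_false_or_eq_true (pvVsN vs i) with h' | h'
    · rw [h', hρ.2.2.1 i hi' h']
      rw [h']
    · rw [h', hρ.2.2.2 i hi' h']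
  rw [hreps]
  apply List.map_congr_left
  intro i hi
  rfl

/- ---------- main assembly ---------- -/

lemma pvRoot_idem {n : Nat} {par : List Int} (h : pvInv n par) {x : Nat} (hx : x < n) :
    pvRoot par (pvRoot par x) = pvRoot par x :=
  pvRoot_fix_self (pvRoot_isFix h hx)

lemma pvEdges_joint {vs : List Int} {n : Nat} :
    ∀ (edges : List (List Int)) (par : List Int) (comps : List (List Int)),
    pvInv n par → pvGoodRho vs n (pvRoot par) → comps = pvCanon vs n (pvRoot par) →
    (∀ e ∈ edges, pvEdgeOK vs (n : Int) e = true) →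
    pvInv n (edges.foldl (edgeStepA vs) par) ∧
      pvGoodRho vs n (pvRoot (edges.foldl (edgeStepA vs) par)) ∧
      edges.foldl (mergeStepB vs) comps = pvCanon vs n (pvRoot (edges.foldl (edgeStepA vs) par)) := by
  intro edges
  induction edges with
  | nil =>
    intro par comps hInv hρ hcomps _
    exact ⟨hInv, hρ, hcomps⟩
  | cons e t ih =>
    intro par comps hInv hρ hcomps hok
    have hoke := hok e (by simp)
    rw [pvEdgeOK] at hoke
    simp only [Bool.and_eq_true, Bool.or_eq_true, decide_eq_true_eq, Bool.not_eq_eq_eq_not,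
      Bool.not_true, List.isEmpty_eq_false_iff] at hoke
    have hne : e ≠ [] := by
      rcases hoke with ⟨h', _⟩
      simpa using h'
    have hget0 : PySem.List.pyGetD e 0 0 = e.getD 0 0 := PySem.List.pyGetD_zero e 0
    rw [List.foldl_cons, List.foldl_cons]
    by_cases hv0 : vs.contains (PySem.List.pyGetD e 0 0) = true
    · -- first endpoint removed: both sides skip
      have hA : edgeStepA vs par e = par := by
        rw [edgeStepA, if_pos hv0]
      have hB : mergeStepB vs comps e = comps := by
        rw [mergeStepB, if_pos hv0]
      rw [hA, hB]
      exact ih par comps hInv hρ hcomps (fun e' he' => hok e' (by simp [he']))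
    · have hrest : 2 ≤ e.length ∧ (vs.contains (e.getD 1 0) = true ∨
          (0 ≤ e.getD 0 0 ∧ e.getD 0 0 < (n : Int) ∧ 0 ≤ e.getD 1 0 ∧ e.getD 1 0 < (n : Int))) := by
        rcases hoke with ⟨_, hcase | hcase⟩
        · exfalso
          rw [hget0] at hv0
          exact hv0 hcase
        · exact ⟨hcase.1, by tauto⟩
      have hget1 : PySem.List.pyGetD e 1 0 = e.getD 1 0 := by
        have h1 : (1 : Int) = ((1 : Nat) : Int) := by norm_num
        rw [h1, PySem.List.pyGetD_natCast]
      by_cases hv1 : vs.contains (PySem.List.pyGetD e 1 0) = true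
      · have hA : edgeStepA vs par e = par := by
          rw [edgeStepA, if_neg hv0, if_pos hv1]
        have hB : mergeStepB vs comps e = comps := by
          rw [mergeStepB, if_neg hv0]
          simp only [hv1, if_true]
        rw [hA, hB]
        exact ih par comps hInv hρ hcomps (fun e' he' => hok e' (by simp [he']))
      · have hbounds : 0 ≤ e.getD 0 0 ∧ e.getD 0 0 < (n : Int) ∧
            0 ≤ e.getD 1 0 ∧ e.getD 1 0 < (n : Int) := by
          rcases hrest.2 with hcase | hcase
          · exfalso
            rw [hget1] at hv1
            exact hv1 hcase
          · exact hcase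
        set u := (PySem.List.pyGetD e 0 0).toNat with hu_def
        set v := (PySem.List.pyGetD e 1 0).toNat with hv_def
        have hu_lt : u < n := by
          rw [hu_def, hget0]
          omega
        have hv_lt : v < n := by
          rw [hv_def, hget1]
          omega
        have hcast0 : PySem.List.pyGetD e 0 0 = ((u : Nat) : Int) := by
          rw [hu_def, hget0]
          omega
        have hcast1 : PySem.List.pyGetD e 1 0 = ((v : Nat) : Int) := by
          rw [hv_def, hget1]
          omega
        have hu_vs : vs.contains ((u : Nat) : Int) = false := by
          rw [← hcast0]
          cases hb : vs.contains (PySem.List.pyGetD e 0 0)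
          · rfl
          · exact absurd hb hv0
        have hv_vs : vs.contains ((v : Nat) : Int) = false := by
          rw [← hcast1]
          cases hb : vs.contains (PySem.List.pyGetD e 1 0)
          · rfl
          · exact absurd hb hv1
        have hv1' : vs.contains (PySem.List.pyGetD e 1 0) = false := by
          cases hb : vs.contains (PySem.List.pyGetD e 1 0)
          · rfl
          · exact absurd hb hv1
        have hA : edgeStepA vs par e = uniteA n par u v := by
          rw [edgeStepA, if_neg hv0, if_neg (by rw [hv1']; exact Bool.false_ne_true), hInv.1]
        obtain ⟨hInv', hroots'⟩ := pvUniteA_spec hInv hu_lt hv_lt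
        have hB : mergeStepB vs comps e = pvCanon vs n
            (fun x => if pvRoot par x = pvRoot par u then pvRoot par v else pvRoot par x) := by
          rw [hcomps]
          exact pvMergeStepB_spec hρ hu_lt hv_lt hcast0 hcast1 hu_vs hv_vs
        have hcanon' : pvCanon vs n
            (fun x => if pvRoot par x = pvRoot par u then pvRoot par v else pvRoot par x) =
            pvCanon vs n (pvRoot (uniteA n par u v)) :=
          pvCanon_congr (fun x hx => (hroots' x hx).symm)
        have hρ' : pvGoodRho vs n (pvRoot (uniteA n par u v)) := by
          refine ⟨fun x hx => pvRoot_lt hInv' hx, fun x hx => pvRoot_idem hInv' hx, ?_, ?_⟩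
          · intro x hx hvx
            have hxfix : pvRoot par x = x := hρ.2.2.1 x hx hvx
            have hρu : pvVsN vs (pvRoot par u) = false := hρ.2.2.2 u hu_lt hu_vs
            rw [hroots' x hx, hxfix]
            rw [if_neg ?_]
            intro hcon
            rw [← hcon] at hρu
            rw [hvx] at hρu
            exact Bool.false_ne_true hρu.symm
          · intro x hx hvx
            rw [hroots' x hx]
            by_cases hc : pvRoot par x = pvRoot par u
            · rw [if_pos hc]
              exact hρ.2.2.2 v hv_lt hv_vs
            · rw [if_neg hc]
              exact hρ.2.2.2 x hx hvx
        rw [hA]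
        exact ih (uniteA n par u v) (mergeStepB vs comps e) hInv' hρ'
          (hB.trans hcanon') (fun e' he' => hok e' (by simp [he']))
lemma pvInit (n : Nat) : pvInv n (PySem.List.pyRange 0 (n : Int) 1) ∧
    ∀ x, x < n → pvRoot (PySem.List.pyRange 0 (n : Int) 1) x = x := by
  have hlen : (PySem.List.pyRange 0 (n : Int) 1).length = n := by
    rw [PySem.List.length_pyRange_one]
    simp
  have hget : ∀ x, x < n → (PySem.List.pyRange 0 (n : Int) 1).getD x 0 = ((x : Nat) : Int) := by
    intro x hx
    rw [PySem.List.pyRange_zero_nat]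
    rw [List.getD_eq_getElem?_getD, List.getElem?_map, List.getElem?_range hx]
    rfl
  have hstep : ∀ x, x < n → pvStep (PySem.List.pyRange 0 (n : Int) 1) x = x := by
    intro x hx
    rw [pvStep, hget x hx]
    simp
  refine ⟨⟨hlen, ?_, ?_⟩, ?_⟩
  · intro x hx
    rw [hstep x hx, hget x hx]
    exact ⟨rfl, hx⟩
  · intro x hx k _ _
    exact hstep x hx
  · intro x hx
    rw [pvRoot, Function.iterate_fixed (hstep x hx)]

-- ===== VERDICT (by name: the statement is the Claim_ definition above) =====
theorem get_disjoint_unions_spec : Claim_equal_get_disjoint_unions := by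
  intro problem vs _ hpre
  show get_disjoint_unions problem vs = get_disjoint_unions_alt problem vs
  unfold Pre_get_disjoint_unions pvPreB at hpre
  rcases hfig : problem.lookup "figure" with _ | fig
  · rw [hfig] at hpre
    exact absurd hpre (by simp)
  simp only [hfig] at hpre
  rcases hverts : fig.lookup "vertices" with _ | verts
  · simp only [hverts] at hpre
    exact absurd hpre (by simp)
  simp only [hverts] at hpre
  rcases hedges : fig.lookup "edges" with _ | edges
  · simp only [hedges] at hpre
    exact absurd hpre (by simp)
  simp only [hedges] at hpre
  rw [Bool.and_eq_true, Bool.and_eq_true] at hpre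
  have hok : ∀ e ∈ edges, pvEdgeOK vs ((verts.length : Nat) : Int) e = true := by
    intro e he
    exact List.all_eq_true.1 hpre.2 e he
  rw [get_disjoint_unions, get_disjoint_unions_alt]
  simp only [hfig, hverts, hedges]
  set n := verts.length with hn
  obtain ⟨hInv0, hroot0⟩ := pvInit n
  have hρ0 : pvGoodRho vs n (pvRoot (PySem.List.pyRange 0 (n : Int) 1)) := by
    refine ⟨?_, ?_, ?_, ?_⟩
    · intro x hx
      rw [hroot0 x hx]
      exact hx
    · intro x hx
      rw [hroot0 x hx, hroot0 x hx]
    · intro x hx _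
      exact hroot0 x hx
    · intro x hx h
      rw [hroot0 x hx]
      exact h
  have hcomps0 : ((PySem.List.pyRange 0 (n : Int) 1).filter (fun i => !vs.contains i)).map
      (fun i => [i]) = pvCanon vs n (pvRoot (PySem.List.pyRange 0 (n : Int) 1)) := by
    rw [← pvCanon_init vs n]
    exact pvCanon_congr (fun x hx => (hroot0 x hx).symm)
  obtain ⟨hInv1, hρ1, hB⟩ := pvEdges_joint edges (PySem.List.pyRange 0 (n : Int) 1)
    (((PySem.List.pyRange 0 (n : Int) 1).filter (fun i => !vs.contains i)).map (fun i => [i]))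
    hInv0 hρ0 hcomps0 hok
  rw [hB]
  have hlen1 : (edges.foldl (edgeStepA vs) (PySem.List.pyRange 0 (n : Int) 1)).length = n :=
    hInv1.1
  rw [hlen1]
  exact pvGroup_spec hInv1 hρ1
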